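-- pv_equiv track=rewrite | github.com/ThanhChinhBK/interview-programing-questions | interview/smaxxxxx/JNV34G-VSZ.py | solution
-- ===== SOURCE A (Python) =====
-- def check_neighbour(A, row_ind, col_ind, num_rows, num_cols):
--     if A[row_ind][col_ind] == 0:
--         return;
--     curr_area = A[row_ind][col_ind]
--     A[row_ind][col_ind] = 0
--     if row_ind + 1 < num_rows and A[row_ind+1][col_ind] == curr_area:
--         check_neighbour(A, row_ind+1, col_ind, num_rows, num_cols)
--     if row_ind - 1 >= 0 and A[row_ind - 1][col_ind] == curr_area:
--         check_neighbour(A, row_ind - 1, col_ind, num_rows, num_cols)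
--     if col_ind + 1 < num_cols and A[row_ind][col_ind + 1] == curr_area:
--         check_neighbour(A, row_ind, col_ind + 1, num_rows, num_cols)
--     if col_ind - 1 >= 0 and A[row_ind][col_ind - 1] == curr_area:
--         check_neighbour(A, row_ind, col_ind - 1, num_rows, num_cols)
--
-- def solution(A):
--     # write your code in Python 3.6
--     res = 0
--     num_rows = len(A)
--     num_cols = len(A[0])
--     for row_ind in range(num_rows):
--         for col_ind in range(num_cols):
--             if A[row_ind][col_ind] > 0:
--                 check_neighbour(A, row_ind, col_ind, num_rows, num_cols)
--                 res += 1
--     return res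
-- ===== SOURCE B (Python) =====
-- def solution(A):
--     # write your code in Python 3.6
--     res = 0
--     num_rows = len(A)
--     num_cols = len(A[0])
--     for r in range(num_rows):
--         for c in range(num_cols):
--             if A[r][c] > 0:
--                 res += 1
--                 stack = [(r, c)]
--                 while stack:
--                     i, j = stack.pop()
--                     v = A[i][j]
--                     if v == 0:
--                         continue
--                     A[i][j] = 0
--                     if j - 1 >= 0 and A[i][j - 1] == v:
--                         stack.append((i, j - 1))
--                     if j + 1 < num_cols and A[i][j + 1] == v:
--                         stack.append((i, j + 1))
--                     if i - 1 >= 0 and A[i - 1][j] == v: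
--                         stack.append((i - 1, j))
--                     if i + 1 < num_rows and A[i + 1][j] == v:
--                         stack.append((i + 1, j))
--     return res
-- ===== Notes on version B (the rewrite author's own statement) =====
-- stated objective: alternative
-- what changed: the recursive flood fill (check_neighbour) is replaced by an iterative flood fill with an explicit stack inside solution's double loop; Pre_ excludes empty grids and grids with a row shorter than len(A[0]), on which A raises IndexError
import Mathlib
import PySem

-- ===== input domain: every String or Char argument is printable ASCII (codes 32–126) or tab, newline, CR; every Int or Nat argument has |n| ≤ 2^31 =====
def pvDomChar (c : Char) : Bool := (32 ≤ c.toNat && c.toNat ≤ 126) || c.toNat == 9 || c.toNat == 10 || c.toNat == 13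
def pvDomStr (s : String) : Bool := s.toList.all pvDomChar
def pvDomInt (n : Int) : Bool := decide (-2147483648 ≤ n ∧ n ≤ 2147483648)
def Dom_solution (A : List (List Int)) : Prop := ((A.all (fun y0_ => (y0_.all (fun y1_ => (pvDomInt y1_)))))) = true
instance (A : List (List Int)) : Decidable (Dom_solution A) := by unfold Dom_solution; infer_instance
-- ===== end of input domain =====

-- B replaces A's recursive flood fill by an explicit-stack iterative one; equal return value,
-- and both perform the same in-place mutation (every flooded positive cell is set to 0).

-- grid read A[r][c]: out-of-range reads yield 0 (Pre_ keeps all Python accesses in range)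
def gget (g : List (List Int)) (r c : Nat) : Int := (g.getD r []).getD c 0
-- grid write A[r][c] = v
def gset (g : List (List Int)) (r c : Nat) (v : Int) : List (List Int) :=
  g.set r ((g.getD r []).set c v)
-- number of nonzero cells: used only as a provably sufficient fuel bound for the loops
def nz (g : List (List Int)) : Nat :=
  (g.map (fun row => row.countP (fun x => decide (x ≠ 0)))).sum

-- ===== PORT A =====
-- the four neighbour checks of check_neighbour, in source order: down, up, right, left
-- (each entry: bounds test, row index, column index)
def cnDirs (r c nr nc : Nat) : List (Bool × Nat × Nat) :=
  [(decide (r + 1 < nr), r + 1, c), (decide (1 ≤ r), r - 1, c),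
   (decide (c + 1 < nc), r, c + 1), (decide (1 ≤ c), r, c - 1)]

-- check_neighbour: literal transliteration (the foldl performs the four conditional
-- recursive calls in source order on the evolving grid); fuel only makes it total
def cn : Nat → List (List Int) → Nat → Nat → Nat → Nat → List (List Int)
  | 0, g, _, _, _, _ => g
  | fuel + 1, g, r, c, nr, nc =>
    if gget g r c = 0 then g
    else
      List.foldl
        (fun g' p => if p.1 ∧ gget g' p.2.1 p.2.2 = gget g r c then cn fuel g' p.2.1 p.2.2 nr nc else g')
        (gset g r c 0) (cnDirs r c nr nc)

def solLoopA (g : List (List Int)) (cells : List (Nat × Nat)) (nr nc : Nat) (res : Int) : Int :=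
  match cells with
  | [] => res
  | (r, c) :: rest =>
    if gget g r c > 0 then
      solLoopA (cn (nz g + 1) g r c nr nc) rest nr nc (res + 1)
    else
      solLoopA g rest nr nc res

def solution (A : List (List Int)) : Int :=
  let nr := A.length
  let nc := (A.getD 0 []).length
  solLoopA A ((List.range nr).flatMap (fun r => (List.range nc).map (fun c => (r, c)))) nr nc 0

-- ===== PORT B =====
-- the four neighbour pushes of the while loop, in source order: left, right, up, down
def pushDirs (i j nr nc : Nat) : List (Bool × Nat × Nat) :=
  [(decide (1 ≤ j), i, j - 1), (decide (j + 1 < nc), i, j + 1),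
   (decide (1 ≤ i), i - 1, j), (decide (i + 1 < nr), i + 1, j)]

-- one conditional stack.append
def pushStep (g1 : List (List Int)) (v : Int) :
    List (Nat × Nat) → (Bool × Nat × Nat) → List (Nat × Nat) :=
  fun s p => if p.1 ∧ gget g1 p.2.1 p.2.2 = v then (p.2.1, p.2.2) :: s else s

-- iterative flood fill; head of the list is the top of the Python stack; fuel only makes it total
def floodStack : Nat → List (List Int) → List (Nat × Nat) → Nat → Nat → List (List Int)
  | _, g, [], _, _ => g
  | 0, g, _ :: _, _, _ => g
  | fuel + 1, g, (i, j) :: rest, nr, nc =>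
    if gget g i j = 0 then floodStack fuel g rest nr nc
    else
      floodStack fuel (gset g i j 0)
        (List.foldl (pushStep (gset g i j 0) (gget g i j)) rest (pushDirs i j nr nc)) nr nc

def solLoopB (g : List (List Int)) (cells : List (Nat × Nat)) (nr nc : Nat) (res : Int) : Int :=
  match cells with
  | [] => res
  | (r, c) :: rest =>
    if gget g r c > 0 then
      solLoopB (floodStack (4 * nz g + 2) g [(r, c)] nr nc) rest nr nc (res + 1)
    else
      solLoopB g rest nr nc res

def solution_alt (A : List (List Int)) : Int :=
  let nr := A.length
  let nc := (A.getD 0 []).length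
  solLoopB A ((List.range nr).flatMap (fun r => (List.range nc).map (fun c => (r, c)))) nr nc 0

-- ===== PRECONDITION & SPEC =====
-- Pre_ excludes exactly the inputs on which Python A raises IndexError: the empty grid
-- (A[0] fails) and grids where some row is shorter than len(A[0]).
def Pre_solution (A : List (List Int)) : Prop :=
  A ≠ [] ∧ ∀ row ∈ A, (A.getD 0 []).length ≤ row.length
instance (A : List (List Int)) : Decidable (Pre_solution A) := by
  unfold Pre_solution; infer_instance

def pvWitness_solution : List (List Int) := [[1, 0], [0, 2]]

def Spec_solution (A : List (List Int)) (out : Int) : Prop := out = solution_alt A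
instance (A : List (List Int)) (out : Int) : Decidable (Spec_solution A out) := by
  unfold Spec_solution; infer_instance

-- ===== CLAIM (what is proved, stated in full; the proofs are below) =====
def Claim_equal_solution : Prop :=
  ∀ (A : List (List Int)), Dom_solution A → Pre_solution A → Spec_solution A (solution A)

-- ===== LEMMAS AND PROOFS =====

-- the step function of cn's foldl, named for use in lemmas
def cnStep (f nr nc : Nat) (curr : Int) :
    List (List Int) → (Bool × Nat × Nat) → List (List Int) :=
  fun g' p => if p.1 ∧ gget g' p.2.1 p.2.2 = curr then cn f g' p.2.1 p.2.2 nr nc else g'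

theorem cn_succ (f : Nat) (g : List (List Int)) (r c nr nc : Nat) :
    cn (f + 1) g r c nr nc =
      if gget g r c = 0 then g
      else List.foldl (cnStep f nr nc (gget g r c)) (gset g r c 0) (cnDirs r c nr nc) := rfl

theorem pushDirs_rev (i j nr nc : Nat) : (pushDirs i j nr nc).reverse = cnDirs i j nr nc := rfl

-- getD after set: unchanged, or the written value at the written (in-range) index
theorem getD_set_or {α : Type} (d : α) (l : List α) (i : Nat) (v : α) (y : Nat) :
    (l.set i v).getD y d = l.getD y d ∨ ((l.set i v).getD y d = v ∧ i = y) := by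
  induction l generalizing i y with
  | nil => left; simp
  | cons a t ih =>
    cases i with
    | zero =>
      cases y with
      | zero => right; simp
      | succ y => left; simp
    | succ i =>
      cases y with
      | zero => left; simp
      | succ y =>
        rcases ih i y with h | ⟨h1, h2⟩
        · left; simpa using h
        · right; exact ⟨by simpa using h1, by omega⟩

theorem gget_gset_or (g : List (List Int)) (r c : Nat) (v : Int) (x y : Nat) :
    gget (gset g r c v) x y = gget g x y ∨
      (gget (gset g r c v) x y = v ∧ r = x ∧ c = y) := by
  unfold gget gset
  rcases getD_set_or ([] : List Int) g r ((g.getD r []).set c v) x with h | ⟨h1, h2⟩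
  · left; rw [h]
  · subst h2
    rw [h1]
    rcases getD_set_or (0 : Int) (g.getD r []) c v y with h | ⟨h3, h4⟩
    · left; rw [h]
    · right; exact ⟨h3, rfl, h4⟩

-- "g' only zeroes cells of g"
def Zrel (g g' : List (List Int)) : Prop :=
  ∀ x y, gget g' x y = gget g x y ∨ gget g' x y = 0

theorem Zrel_refl (g : List (List Int)) : Zrel g g := fun _ _ => Or.inl rfl

theorem Zrel_trans {g1 g2 g3 : List (List Int)} (h12 : Zrel g1 g2) (h23 : Zrel g2 g3) :
    Zrel g1 g3 := by
  intro x y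
  rcases h23 x y with h | h
  · rw [h]; exact h12 x y
  · right; exact h

theorem Zrel_gset (g : List (List Int)) (r c : Nat) : Zrel g (gset g r c 0) := by
  intro x y
  rcases gget_gset_or g r c 0 x y with h | ⟨h, _⟩
  · left; exact h
  · right; exact h

theorem Zrel_foldl (f nr nc : Nat) (v : Int)
    (hcn : ∀ g r c, Zrel g (cn f g r c nr nc)) :
    ∀ (ds : List (Bool × Nat × Nat)) (g : List (List Int)),
      Zrel g (List.foldl (cnStep f nr nc v) g ds) := by
  intro ds
  induction ds with
  | nil => intro g; exact Zrel_refl g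
  | cons d t ih =>
    intro g
    rw [List.foldl_cons]
    refine Zrel_trans (g2 := cnStep f nr nc v g d) ?_ (ih _)
    unfold cnStep
    split
    · exact hcn _ _ _
    · exact Zrel_refl _

theorem Zrel_cn (f : Nat) : ∀ (g : List (List Int)) (r c : Nat) (nr nc : Nat),
    Zrel g (cn f g r c nr nc) := by
  induction f with
  | zero => intro g r c nr nc; exact Zrel_refl g
  | succ f ih =>
    intro g r c nr nc
    rw [cn_succ]
    split
    · exact Zrel_refl g
    · exact Zrel_trans (Zrel_gset g r c) (Zrel_foldl f nr nc _ (fun g r c => ih g r c nr nc) _ _)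

theorem rowNZ_set (row : List Int) (c : Nat) (h : row.getD c 0 ≠ 0) :
    (row.set c 0).countP (fun x => decide (x ≠ 0)) + 1
      = row.countP (fun x => decide (x ≠ 0)) := by
  induction row generalizing c with
  | nil => simp at h
  | cons a t ih =>
    cases c with
    | zero =>
      simp only [List.getD_cons_zero] at h
      simp only [List.set_cons_zero, List.countP_cons]
      simp [h]
    | succ c =>
      simp only [List.getD_cons_succ] at h
      have := ih c h
      simp only [List.set_cons_succ, List.countP_cons]
      omega

theorem nz_gset (g : List (List Int)) (r c : Nat) (h : gget g r c ≠ 0) :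
    nz (gset g r c 0) + 1 = nz g := by
  induction g generalizing r with
  | nil => simp [gget] at h
  | cons row t ih =>
    cases r with
    | zero =>
      unfold gget at h
      simp only [List.getD_cons_zero] at h
      unfold gset nz
      simp only [List.getD_cons_zero, List.set_cons_zero, List.map_cons, List.sum_cons]
      have := rowNZ_set row c h
      omega
    | succ r =>
      unfold gget at h
      simp only [List.getD_cons_succ] at h
      have hr := ih r (by unfold gget; exact h)
      unfold gset nz at hr ⊢
      simp only [List.getD_cons_succ, List.set_cons_succ, List.map_cons, List.sum_cons]
      omega

theorem nz_foldl_le (f nr nc : Nat) (v : Int)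
    (hcn : ∀ g r c, nz (cn f g r c nr nc) ≤ nz g) :
    ∀ (ds : List (Bool × Nat × Nat)) (g : List (List Int)),
      nz (List.foldl (cnStep f nr nc v) g ds) ≤ nz g := by
  intro ds
  induction ds with
  | nil => intro g; exact le_rfl
  | cons d t ih =>
    intro g
    rw [List.foldl_cons]
    refine le_trans (ih _) ?_
    unfold cnStep
    split
    · exact hcn _ _ _
    · exact le_rfl

theorem nz_cn_le (f : Nat) : ∀ (g : List (List Int)) (r c nr nc : Nat),
    nz (cn f g r c nr nc) ≤ nz g := by
  induction f with
  | zero => intro g r c nr nc; exact le_rfl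
  | succ f ih =>
    intro g r c nr nc
    rw [cn_succ]
    split
    · exact le_rfl
    · rename_i hne
      have h1 := nz_gset g r c hne
      refine le_trans (nz_foldl_le f nr nc _ (fun g r c => ih g r c nr nc) _ _) ?_
      omega

-- the cells a pass over ds pushes (in pop order: ds is processed front-to-back)
def pushesOf (g1 : List (List Int)) (v : Int) (ds : List (Bool × Nat × Nat)) :
    List (Nat × Nat) :=
  (ds.filter (fun p => decide (p.1 ∧ gget g1 p.2.1 p.2.2 = v))).map (fun p => (p.2.1, p.2.2))

theorem pushesOf_append (g1 : List (List Int)) (v : Int) (ds es : List (Bool × Nat × Nat)) :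
    pushesOf g1 v (ds ++ es) = pushesOf g1 v ds ++ pushesOf g1 v es := by
  unfold pushesOf
  rw [List.filter_append, List.map_append]

theorem pushesOf_length_le (g1 : List (List Int)) (v : Int) (ds : List (Bool × Nat × Nat)) :
    (pushesOf g1 v ds).length ≤ ds.length := by
  unfold pushesOf
  rw [List.length_map]
  exact List.length_filter_le _ _

theorem foldl_push_rev (g1 : List (List Int)) (v : Int) :
    ∀ (ds : List (Bool × Nat × Nat)) (s : List (Nat × Nat)),
      List.foldl (pushStep g1 v) s ds = pushesOf g1 v ds.reverse ++ s := by
  intro ds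
  induction ds with
  | nil => intro s; simp [pushesOf]
  | cons d t ih =>
    intro s
    rw [List.foldl_cons, ih, List.reverse_cons, pushesOf_append]
    have : pushStep g1 v s d = pushesOf g1 v [d] ++ s := by
      unfold pushStep pushesOf
      split
      · rename_i h
        simp [h]
      · rename_i h
        simp [h]
    rw [this, List.append_assoc]

-- unfolding lemmas for floodStack
theorem floodStack_nil (fuel : Nat) (g : List (List Int)) (nr nc : Nat) :
    floodStack fuel g [] nr nc = g := by
  cases fuel <;> rfl

theorem floodStack_cons (fuel : Nat) (g : List (List Int)) (i j : Nat)
    (rest : List (Nat × Nat)) (nr nc : Nat) :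
    floodStack (fuel + 1) g ((i, j) :: rest) nr nc =
      if gget g i j = 0 then floodStack fuel g rest nr nc
      else
        floodStack fuel (gset g i j 0)
          (List.foldl (pushStep (gset g i j 0) (gget g i j)) rest (pushDirs i j nr nc)) nr nc := rfl

-- fuel insensitivity of floodStack above the measure 4·nz + stack length
theorem fs_fuel_eq (f1 : Nat) : ∀ (f2 : Nat) (g : List (List Int)) (st : List (Nat × Nat)) (nr nc : Nat),
    4 * nz g + st.length < f1 → 4 * nz g + st.length < f2 →
    floodStack f1 g st nr nc = floodStack f2 g st nr nc := by
  induction f1 with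
  | zero => intro f2 g st nr nc h1 _; omega
  | succ f1 ih =>
    intro f2 g st nr nc h1 h2
    cases st with
    | nil => rw [floodStack_nil, floodStack_nil]
    | cons p rest =>
      obtain ⟨i, j⟩ := p
      cases f2 with
      | zero => omega
      | succ f2 =>
        rw [floodStack_cons, floodStack_cons]
        simp only [List.length_cons] at h1 h2
        split
        · exact ih f2 g rest nr nc (by omega) (by omega)
        · rename_i hne
          have hz := nz_gset g i j hne
          rw [foldl_push_rev]
          have hlen : (pushesOf (gset g i j 0) (gget g i j) (pushDirs i j nr nc).reverse).length ≤ 4 := by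
            refine le_trans (pushesOf_length_le _ _ _) ?_
            rw [List.length_reverse]
            rfl
          refine ih f2 _ _ nr nc ?_ ?_ <;> (rw [List.length_append]; omega)

-- canonical-fuel run of the stack loop
def FS (nr nc : Nat) (g : List (List Int)) (st : List (Nat × Nat)) : List (List Int) :=
  floodStack (4 * nz g + st.length + 1) g st nr nc

-- core simulation: popping the pushed cells of a direction pass equals cn's sequential pass
theorem SIMgo (nr nc f : Nat) (v : Int) (hv : v ≠ 0) (g1 : List (List Int))
    (IH : ∀ (g : List (List Int)) (r c : Nat) (rest : List (Nat × Nat)), nz g < f →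
      FS nr nc g ((r, c) :: rest) = FS nr nc (cn f g r c nr nc) rest) :
    ∀ (ds : List (Bool × Nat × Nat)) (gc : List (List Int)) (rest : List (Nat × Nat)),
      Zrel g1 gc → nz gc < f →
      FS nr nc gc (pushesOf g1 v ds ++ rest)
        = FS nr nc (List.foldl (cnStep f nr nc v) gc ds) rest := by
  intro ds
  induction ds with
  | nil => intro gc rest _ _; simp [pushesOf]
  | cons d t ih =>
    intro gc rest hzr hnz
    obtain ⟨b, i, j⟩ := d
    by_cases hP : (b : Prop) ∧ gget g1 i j = v
    · have hpush : pushesOf g1 v ((b, i, j) :: t) = (i, j) :: pushesOf g1 v t := by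
        unfold pushesOf
        rw [List.filter_cons]
        simp [hP]
      rw [hpush, List.cons_append]
      by_cases hC : (b : Prop) ∧ gget gc i j = v
      · rw [IH gc i j (pushesOf g1 v t ++ rest) hnz]
        rw [List.foldl_cons]
        have hstep : cnStep f nr nc v gc (b, i, j) = cn f gc i j nr nc := by
          unfold cnStep; simp only []; rw [if_pos hC]
        rw [hstep]
        exact ih (cn f gc i j nr nc) rest
          (Zrel_trans hzr (Zrel_cn f gc i j nr nc))
          (lt_of_le_of_lt (nz_cn_le f gc i j nr nc) hnz)
      · -- pushed from the pre-pass snapshot but zeroed meanwhile: the pop skips it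
        have hz0 : gget gc i j = 0 := by
          rcases hzr i j with h | h
          · exfalso; exact hC ⟨hP.1, by rw [h]; exact hP.2⟩
          · exact h
        have hfs : FS nr nc gc ((i, j) :: (pushesOf g1 v t ++ rest))
            = FS nr nc gc (pushesOf g1 v t ++ rest) := by
          unfold FS
          have hfuel : 4 * nz gc + ((i, j) :: (pushesOf g1 v t ++ rest)).length + 1
              = (4 * nz gc + (pushesOf g1 v t ++ rest).length + 1) + 1 := by
            simp only [List.length_cons]; omega
          rw [hfuel, floodStack_cons, if_pos hz0]
        rw [hfs]
        rw [List.foldl_cons]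
        have hstep : cnStep f nr nc v gc (b, i, j) = gc := by
          unfold cnStep; simp only []; rw [if_neg hC]
        rw [hstep]
        exact ih gc rest hzr hnz
    · have hpush : pushesOf g1 v ((b, i, j) :: t) = pushesOf g1 v t := by
        unfold pushesOf
        rw [List.filter_cons]
        simp [hP]
      have hC : ¬((b : Prop) ∧ gget gc i j = v) := by
        intro hC
        rcases hzr i j with h | h
        · exact hP ⟨hC.1, by rw [← h]; exact hC.2⟩
        · exact hv (by rw [← hC.2, h])
      rw [hpush, List.foldl_cons]
      have hstep : cnStep f nr nc v gc (b, i, j) = gc := by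
        unfold cnStep; simp only []; rw [if_neg hC]
      rw [hstep]
      exact ih gc rest hzr hnz

-- main simulation: one stack pop + its pushes = one recursive check_neighbour call
theorem SIM (nr nc : Nat) : ∀ (fA : Nat) (g : List (List Int)) (r c : Nat) (rest : List (Nat × Nat)),
    nz g < fA →
    FS nr nc g ((r, c) :: rest) = FS nr nc (cn fA g r c nr nc) rest := by
  intro fA
  induction fA with
  | zero => intro g r c rest h; omega
  | succ f ih =>
    intro g r c rest h
    rw [cn_succ]
    by_cases h0 : gget g r c = 0
    · rw [if_pos h0]
      unfold FS
      have : 4 * nz g + ((r, c) :: rest).length + 1 = (4 * nz g + rest.length + 1) + 1 := by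
        simp only [List.length_cons]; omega
      rw [this, floodStack_cons, if_pos h0]
    · rw [if_neg h0]
      have hz := nz_gset g r c h0
      unfold FS
      have hfuel : 4 * nz g + ((r, c) :: rest).length + 1 = (4 * nz g + rest.length + 1) + 1 := by
        simp only [List.length_cons]; omega
      rw [hfuel, floodStack_cons, if_neg h0, foldl_push_rev, pushDirs_rev]
      -- switch to the canonical fuel, then run the direction pass
      set st := pushesOf (gset g r c 0) (gget g r c) (cnDirs r c nr nc) ++ rest with hst
      have hlen : st.length ≤ rest.length + 4 := by
        rw [hst, List.length_append]
        have h1 := pushesOf_length_le (gset g r c 0) (gget g r c) (cnDirs r c nr nc)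
        have h2 : (cnDirs r c nr nc).length = 4 := rfl
        omega
      have hswap : floodStack (4 * nz g + rest.length + 1) (gset g r c 0) st nr nc
          = FS nr nc (gset g r c 0) st := by
        unfold FS
        exact fs_fuel_eq _ _ _ _ _ _ (by omega) (by omega)
      rw [hswap]
      have := SIMgo nr nc f (gget g r c) h0 (gset g r c 0)
        (fun g' r' c' rest' h' => ih g' r' c' rest' h')
        (cnDirs r c nr nc) (gset g r c 0) rest (Zrel_refl _) (by omega)
      rw [hst]
      exact this

-- B's per-cell flood with its stated fuel equals A's per-cell recursive flood with its stated fuel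
theorem flood_eq_cn (g : List (List Int)) (r c nr nc : Nat) :
    floodStack (4 * nz g + 2) g [(r, c)] nr nc = cn (nz g + 1) g r c nr nc := by
  have h : floodStack (4 * nz g + 2) g [(r, c)] nr nc = FS nr nc g ((r, c) :: []) := by
    unfold FS
    simp only [List.length_cons, List.length_nil]
  rw [h, SIM nr nc (nz g + 1) g r c [] (by omega)]
  unfold FS
  rw [floodStack_nil]

theorem loops_eq : ∀ (cells : List (Nat × Nat)) (g : List (List Int)) (nr nc : Nat) (res : Int),
    solLoopA g cells nr nc res = solLoopB g cells nr nc res := by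
  intro cells
  induction cells with
  | nil => intro g nr nc res; rfl
  | cons p rest ih =>
    intro g nr nc res
    obtain ⟨r, c⟩ := p
    rw [solLoopA, solLoopB]
    split
    · rw [flood_eq_cn]
      exact ih _ _ _ _
    · exact ih _ _ _ _

-- ===== VERDICT (by name: the statement is the Claim_ definition above) =====
theorem solution_spec : Claim_equal_solution := by
  intro A _ _
  unfold Spec_solution solution solution_alt
  exact loops_eq _ _ _ _ _
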